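-- pv_equiv track=rewrite | github.com/jasperan/ai-congress | src/ai_congress/core/debate_manager.py | detect_indecisive
-- ===== SOURCE A (Python) =====
-- from typing import Dict, List, Optional, Set
--
-- def detect_indecisive(
--     position_history: Dict[str, List[int]], round_num: int
-- ) -> Set[str]:
--     """Models that switched clusters between rounds."""
--     indecisive = set()
--     for model, positions in position_history.items():
--         if len(positions) >= 2 and len(set(positions)) > 1:
--             indecisive.add(model)
--     return indecisive
-- ===== SOURCE B (Python) =====
-- def detect_indecisive(position_history, round_num):
--     """Models that switched clusters between rounds."""
--     indecisive = set()
--     for model, positions in position_history.items():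
--         if any(x != y for x, y in zip(positions, positions[1:])):
--             indecisive.add(model)
--     return indecisive
-- ===== Notes on version B (the rewrite author's own statement) =====
-- stated objective: alternative
-- what changed: Replaces A's per-model distinct-value set build plus the length>=2 guard with a short-circuiting adjacent-pair scan (any over zip(positions, positions[1:])) that maintains no set and needs no length check.
import Mathlib
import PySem

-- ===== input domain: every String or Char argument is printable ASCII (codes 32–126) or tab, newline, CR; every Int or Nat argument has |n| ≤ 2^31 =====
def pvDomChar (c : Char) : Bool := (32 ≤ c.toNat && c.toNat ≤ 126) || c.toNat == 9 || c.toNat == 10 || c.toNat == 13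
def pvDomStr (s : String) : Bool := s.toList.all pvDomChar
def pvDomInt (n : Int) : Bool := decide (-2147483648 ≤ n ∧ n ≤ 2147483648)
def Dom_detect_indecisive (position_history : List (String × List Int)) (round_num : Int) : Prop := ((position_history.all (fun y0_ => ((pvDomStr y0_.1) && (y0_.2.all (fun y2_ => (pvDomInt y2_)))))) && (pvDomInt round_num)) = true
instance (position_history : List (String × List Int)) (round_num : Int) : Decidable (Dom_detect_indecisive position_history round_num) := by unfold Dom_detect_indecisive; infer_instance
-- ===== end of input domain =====

-- B replaces A's per-model distinct-value set (len(set)>1 plus a length guard) with a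
-- short-circuiting adjacent-pair scan; alternative decomposition, same cost.

-- ===== PORT A =====
-- for model, positions: if len(positions) >= 2 and len(set(positions)) > 1: indecisive.add(model)
def detect_indecisive (position_history : List (String × List Int)) (round_num : Int) : List String :=
  position_history.foldl (fun indecisive mp =>
    if 2 ≤ mp.2.length ∧ 1 < PySem.Set.len (PySem.Set.ofList mp.2) then
      PySem.Set.add indecisive mp.1
    else indecisive) PySem.Set.empty

-- ===== PORT B =====
-- any(x != y for x, y in zip(positions, positions[1:])) — short-circuiting adjacent scan
def anyAdjNe : List Int → Bool
  | a :: b :: rest => a != b || anyAdjNe (b :: rest)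
  | _ => false

def detect_indecisive_alt (position_history : List (String × List Int)) (round_num : Int) : List String :=
  position_history.foldl (fun indecisive mp =>
    if anyAdjNe mp.2 then PySem.Set.add indecisive mp.1 else indecisive) PySem.Set.empty

-- ===== PRECONDITION & SPEC =====
def Spec_detect_indecisive (position_history : List (String × List Int)) (round_num : Int) (out : List String) : Prop := out = detect_indecisive_alt position_history round_num
instance (position_history : List (String × List Int)) (round_num : Int) (out : List String) : Decidable (Spec_detect_indecisive position_history round_num out) := by unfold Spec_detect_indecisive; infer_instance

-- ===== CLAIM (what is proved, stated in full; the proofs are below) =====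
def Claim_equal_detect_indecisive : Prop := ∀ (position_history : List (String × List Int)) (round_num : Int), Dom_detect_indecisive position_history round_num → Spec_detect_indecisive position_history round_num (detect_indecisive position_history round_num)

-- ===== LEMMAS AND PROOFS =====

lemma anyAdjNe_cons_iff (a : Int) (xs : List Int) :
    anyAdjNe (a :: xs) = true ↔ ∃ x ∈ xs, x ≠ a := by
  induction xs generalizing a with
  | nil => simp [anyAdjNe]
  | cons b ys ih =>
    simp only [anyAdjNe, Bool.or_eq_true, bne_iff_ne, ih b, List.mem_cons]
    by_cases h : a = b
    · subst h
      constructor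
      · rintro (h | ⟨x, hx, hxb⟩)
        · exact absurd rfl h
        · exact ⟨x, Or.inr hx, hxb⟩
      · rintro ⟨x, (rfl | hx), hxa⟩
        · exact absurd rfl hxa
        · exact Or.inr ⟨x, hx, hxa⟩
    · constructor
      · intro _; exact ⟨b, Or.inl rfl, fun hb => h hb.symm⟩
      · intro _; exact Or.inl h

lemma nodup_all_eq_len_le {l : List Int} {a : Int} (hn : l.Nodup)
    (h : ∀ x ∈ l, x = a) : l.length ≤ 1 := by
  match l, hn with
  | [], _ => simp
  | [x], _ => simp
  | x :: y :: t, hn =>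
    exfalso
    have hx : x = a := h x (by simp)
    have hy : y = a := h y (by simp)
    have : x ≠ y := by
      have := hn
      simp [List.nodup_cons] at this
      intro hxy; exact this.1.1 hxy
    exact this (hx.trans hy.symm)

lemma condA_iff_anyAdjNe (ps : List Int) :
    (2 ≤ ps.length ∧ 1 < PySem.Set.len (PySem.Set.ofList ps)) ↔ anyAdjNe ps = true := by
  match ps with
  | [] => simp [anyAdjNe, PySem.Set.len]
  | [a] => simp [anyAdjNe]
  | a :: b :: t =>
    rw [anyAdjNe_cons_iff]
    constructor
    · rintro ⟨-, hlen⟩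
      by_contra hne
      push Not at hne
      have hall : ∀ x ∈ PySem.Set.ofList (a :: b :: t), x = a := by
        intro x hx
        rcases List.mem_cons.1 ((PySem.Set.mem_ofList _ _).1 hx) with h | h
        · exact h
        · exact hne x h
      have := nodup_all_eq_len_le (PySem.Set.nodup_ofList _) hall
      simp [PySem.Set.len] at hlen
      omega
    · rintro ⟨x, hx, hxa⟩
      refine ⟨by simp, ?_⟩
      have hxmem : x ∈ PySem.Set.ofList (a :: b :: t) :=
        (PySem.Set.mem_ofList _ _).2 (List.mem_cons_of_mem a hx)
      have hamem : a ∈ PySem.Set.ofList (a :: b :: t) :=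
        (PySem.Set.mem_ofList _ _).2 (List.mem_cons_self)
      have h2 : ({a, x} : Finset Int).card ≤ (PySem.Set.ofList (a :: b :: t)).toFinset.card := by
        apply Finset.card_le_card
        intro y hy
        simp at hy
        rcases hy with rfl | rfl
        · simpa using hamem
        · simpa using hxmem
      have hcard : ({a, x} : Finset Int).card = 2 := by
        rw [Finset.card_insert_of_notMem (by simpa using fun h => hxa h.symm)]
        simp
      have := List.toFinset_card_of_nodup (PySem.Set.nodup_ofList (a :: b :: t))
      simp [PySem.Set.len]
      omega

lemma fold_eq (ph : List (String × List Int)) (acc : List String) :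
    ph.foldl (fun indecisive mp =>
      if 2 ≤ mp.2.length ∧ 1 < PySem.Set.len (PySem.Set.ofList mp.2) then
        PySem.Set.add indecisive mp.1
      else indecisive) acc
    = ph.foldl (fun indecisive mp =>
      if anyAdjNe mp.2 then PySem.Set.add indecisive mp.1 else indecisive) acc := by
  induction ph generalizing acc with
  | nil => rfl
  | cons p t ih =>
    simp only [List.foldl_cons]
    rw [show (if 2 ≤ p.2.length ∧ 1 < PySem.Set.len (PySem.Set.ofList p.2) then
        PySem.Set.add acc p.1 else acc)
      = (if anyAdjNe p.2 then PySem.Set.add acc p.1 else acc) from by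
        by_cases h : anyAdjNe p.2 = true
        · rw [if_pos h, if_pos ((condA_iff_anyAdjNe p.2).2 h)]
        · rw [if_neg h, if_neg (fun hc => h ((condA_iff_anyAdjNe p.2).1 hc))]]
    exact ih _

-- ===== VERDICT (by name: the statement is the Claim_ definition above) =====
theorem detect_indecisive_spec : Claim_equal_detect_indecisive := by
  intro ph rn _
  unfold Spec_detect_indecisive detect_indecisive detect_indecisive_alt
  exact fold_eq ph PySem.Set.empty
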